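-- pv_equiv track=rewrite | github.com/datormx/DinamicaEstocasticaPython | barajas2.py | obtener_pares
-- ===== SOURCE A (Python) =====
-- import collections
--
-- def obtener_pares(manos):
--     pares = 0
--     for mano in manos:
--         valores = []
--         for carta in mano:
--             valores.append(carta[1])
--
--         counter = dict(collections.Counter(valores))
--         for cantidad in counter.values():
--             if cantidad == 2:
--                 pares += 1
--                 break #termina porque se encontró 1 par que es lo que buscábamos
--
--     return pares
-- ===== SOURCE B (Python) =====
-- def obtener_pares(manos):
--     pares = 0
--     for mano in manos:
--         valores = sorted(carta[1] for carta in mano)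
--         if valores:
--             cur, run, found = valores[0], 1, False
--             for v in valores[1:]:
--                 if v == cur:
--                     run += 1
--                 else:
--                     found = found or run == 2
--                     cur, run = v, 1
--             if found or run == 2:
--                 pares += 1
--     return pares
-- ===== Notes on version B (the rewrite author's own statement) =====
-- stated objective: alternative
-- what changed: Replaces the Counter frequency table with sort-then-run-length scan: a hand counts as a pair iff the sorted value list contains a maximal run of length exactly 2.
import Mathlib
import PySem

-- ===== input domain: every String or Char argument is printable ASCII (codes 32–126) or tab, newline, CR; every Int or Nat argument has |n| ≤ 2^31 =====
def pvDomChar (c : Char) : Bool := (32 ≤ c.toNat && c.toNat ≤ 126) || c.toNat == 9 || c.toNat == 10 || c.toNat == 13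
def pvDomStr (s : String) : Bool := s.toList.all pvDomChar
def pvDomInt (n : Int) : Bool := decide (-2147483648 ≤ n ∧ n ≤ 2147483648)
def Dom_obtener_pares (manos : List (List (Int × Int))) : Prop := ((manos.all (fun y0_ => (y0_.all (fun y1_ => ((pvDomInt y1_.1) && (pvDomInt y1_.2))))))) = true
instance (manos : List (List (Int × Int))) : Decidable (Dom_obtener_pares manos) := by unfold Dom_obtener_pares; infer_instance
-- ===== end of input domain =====

-- B replaces A's Counter frequency table by sort-then-run-length scan over the hand's
-- values (a pair = a maximal run of length exactly 2); alternative algorithm, same results.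


-- ===== PORT A =====
-- one hand of A: collect the card values by appending, build dict(Counter(valores)),
-- then scan its values adding 1 at the first count equal to 2 (the 'break' = any)
def pares_step_a (pares : Int) (mano : List (Int × Int)) : Int :=
  let valores : List Int := mano.foldl (fun acc carta => acc ++ [carta.2]) []
  let counter : PySem.Dict Int Int := PySem.Dict.counter valores
  if counter.values.any (fun cantidad => cantidad == 2) then pares + 1 else pares

def obtener_pares (manos : List (List (Int × Int))) : Int :=
  manos.foldl pares_step_a 0

-- ===== PORT B =====
-- B's inner-loop body: state (cur, run, found); a new value closes the current run
def scan_step (s : Int × Int × Bool) (v : Int) : Int × Int × Bool :=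
  if v == s.1 then (s.1, s.2.1 + 1, s.2.2) else (v, 1, s.2.2 || (s.2.1 == 2))

-- one hand of B: sort the values, scan runs of equal consecutive values;
-- the hand has a pair iff some maximal run has length exactly 2
def hand_has_pair (mano : List (Int × Int)) : Bool :=
  match PySem.List.sorted (mano.map (fun carta => carta.2)) (fun v => v) false with
  | [] => false
  | x :: xs =>
      let r := xs.foldl scan_step (x, 1, false)
      r.2.2 || (r.2.1 == 2)

def obtener_pares_alt (manos : List (List (Int × Int))) : Int :=
  manos.foldl (fun pares mano => if hand_has_pair mano then pares + 1 else pares) 0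

-- ===== PRECONDITION & SPEC =====
def Spec_obtener_pares (manos : List (List (Int × Int))) (out : Int) : Prop := out = obtener_pares_alt manos
instance (manos : List (List (Int × Int))) (out : Int) : Decidable (Spec_obtener_pares manos out) := by unfold Spec_obtener_pares; infer_instance

-- ===== CLAIM (what is proved, stated in full; the proofs are below) =====
def Claim_equal_obtener_pares : Prop := ∀ (manos : List (List (Int × Int))), Dom_obtener_pares manos → Spec_obtener_pares manos (obtener_pares manos)

-- ===== LEMMAS AND PROOFS =====

-- A's per-hand test is "some value occurs exactly twice"
lemma counter_any_two (xs : List Int) :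
    ((PySem.Dict.counter xs).values.any (fun c => c == 2) = true)
      ↔ ∃ v ∈ xs, xs.count v = 2 := by
  have hv : (PySem.Dict.counter xs).values = (PySem.Dict.counter xs).items.map (·.2) := rfl
  rw [hv, PySem.Dict.items_counter]
  simp [List.any_eq_true, PySem.Set.mem_ofList]
  constructor
  · rintro ⟨v, hvm, h2⟩; exact ⟨v, hvm, by exact_mod_cast h2⟩
  · rintro ⟨v, hvm, h2⟩; exact ⟨v, hvm, by exact_mod_cast h2⟩

-- invariant of B's run scan on the (sorted) tail: the scan reports true iff a run
-- already closed with length 2, the current value's total run has length 2, or some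
-- strictly larger value ahead occurs exactly twice
lemma go_spec (xs : List Int) (cur run : Int) (found : Bool)
    (hs : xs.Pairwise (· ≤ ·)) (hge : ∀ y ∈ xs, cur ≤ y) :
    (((xs.foldl scan_step (cur, run, found)).2.2
        || ((xs.foldl scan_step (cur, run, found)).2.1 == 2)) = true)
      ↔ (found = true ∨ run + (xs.count cur : Int) = 2 ∨
          ∃ v ∈ xs, cur < v ∧ (xs.count v : Int) = 2) := by
  induction xs generalizing cur run found with
  | nil => simp
  | cons v vs ih =>
    rw [List.pairwise_cons] at hs
    by_cases hv : v = cur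
    · subst hv
      simp only [List.foldl_cons, scan_step, beq_self_eq_true, if_true]
      rw [ih _ _ _ hs.2 hs.1]
      constructor
      · rintro (h | h | ⟨w, hw, hlt, hc⟩)
        · exact Or.inl h
        · refine Or.inr (Or.inl ?_)
          rw [List.count_cons_self]; push_cast; omega
        · refine Or.inr (Or.inr ⟨w, List.mem_cons_of_mem _ hw, hlt, ?_⟩)
          rw [List.count_cons_of_ne (by omega)]; exact hc
      · rintro (h | h | ⟨w, hw, hlt, hc⟩)
        · exact Or.inl h
        · refine Or.inr (Or.inl ?_)
          rw [List.count_cons_self] at h; push_cast at h ⊢; omega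
        · rcases List.mem_cons.mp hw with rfl | hw'
          · omega
          · refine Or.inr (Or.inr ⟨w, hw', hlt, ?_⟩)
            rw [List.count_cons_of_ne (by omega)] at hc; exact hc
    · have hcv : cur < v := lt_of_le_of_ne (hge v (List.mem_cons_self)) (Ne.symm hv)
      have hvne : (v == cur) = false := by simp [hv]
      simp only [List.foldl_cons, scan_step, hvne, if_false, Bool.false_eq_true]
      rw [ih _ _ _ hs.2 hs.1]
      have hnotmem : cur ∉ v :: vs := by
        intro hm
        rcases List.mem_cons.mp hm with rfl | hm'
        · omega
        · have := hs.1 cur hm'; omega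
      have hcnt0 : (v :: vs).count cur = 0 := List.count_eq_zero.mpr hnotmem
      constructor
      · rintro (h | h | ⟨w, hw, hlt, hc⟩)
        · rcases (Bool.or_eq_true _ _).mp h with h' | h'
          · exact Or.inl h'
          · refine Or.inr (Or.inl ?_)
            rw [hcnt0]; push_cast
            have : run = 2 := by simpa using h'
            omega
        · refine Or.inr (Or.inr ⟨v, List.mem_cons_self, hcv, ?_⟩)
          rw [List.count_cons_self]; push_cast at h ⊢; omega
        · have hvw : v < w := lt_of_le_of_ne (hs.1 w hw) (by rintro rfl; omega)
          refine Or.inr (Or.inr ⟨w, List.mem_cons_of_mem _ hw, lt_trans hcv hvw, ?_⟩)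
          rw [List.count_cons_of_ne (by omega)]; exact hc
      · rintro (h | h | ⟨w, hw, hlt, hc⟩)
        · exact Or.inl ((Bool.or_eq_true _ _).mpr (Or.inl h))
        · rw [hcnt0] at h; push_cast at h
          refine Or.inl ((Bool.or_eq_true _ _).mpr (Or.inr ?_))
          simp; omega
        · rcases List.mem_cons.mp hw with rfl | hw'
          · refine Or.inr (Or.inl ?_)
            rw [List.count_cons_self] at hc; push_cast at hc ⊢; omega
          · by_cases hwv : w = v
            · subst hwv
              refine Or.inr (Or.inl ?_)
              rw [List.count_cons_self] at hc; push_cast at hc ⊢; omega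
            · refine Or.inr (Or.inr ⟨w, hw', lt_of_le_of_ne (hs.1 w hw') (Ne.symm hwv), ?_⟩)
              rw [List.count_cons_of_ne (by omega)] at hc; exact hc

-- B's per-hand test is the same predicate, via the sorted list's permutation with the values
lemma hand_has_pair_iff (mano : List (Int × Int)) :
    hand_has_pair mano = true
      ↔ ∃ v ∈ mano.map (fun carta => carta.2), (mano.map (fun carta => carta.2)).count v = 2 := by
  set l0 := mano.map (fun carta => carta.2) with hl0
  have hperm : (PySem.List.sorted l0 (fun v => v) false).Perm l0 := PySem.List.sorted_perm l0 _ _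
  have hpw : (PySem.List.sorted l0 (fun v => v) false).Pairwise (· ≤ ·) := by
    have := PySem.List.sorted_pairwise l0 (fun v => v)
    simpa using this
  unfold hand_has_pair
  rcases hsv : PySem.List.sorted l0 (fun v => v) false with _ | ⟨x, xs⟩
  · simp only [Bool.false_eq_true, false_iff]
    rw [hsv] at hperm
    have : l0 = [] := (List.Perm.nil_eq hperm).symm
    simp [this]
  · rw [hsv] at hperm hpw
    rw [List.pairwise_cons] at hpw
    rw [go_spec xs x 1 false hpw.2 hpw.1]
    have hcnt : ∀ v : Int, l0.count v = (x :: xs).count v := fun v => (hperm.count_eq v).symm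
    have hmem : ∀ v : Int, v ∈ l0 ↔ v ∈ x :: xs := fun v => hperm.mem_iff.symm
    constructor
    · rintro (h | h | ⟨w, hw, hlt, hc⟩)
      · exact absurd h (by simp)
      · refine ⟨x, (hmem x).mpr List.mem_cons_self, ?_⟩
        rw [hcnt, List.count_cons_self]; omega
      · refine ⟨w, (hmem w).mpr (List.mem_cons_of_mem _ hw), ?_⟩
        rw [hcnt, List.count_cons_of_ne (by omega)]; exact_mod_cast hc
    · rintro ⟨v, hv, hc⟩
      rw [hcnt, List.count_cons] at hc
      rcases List.mem_cons.mp ((hmem v).mp hv) with rfl | hv'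
      · simp only [beq_self_eq_true, if_pos] at hc
        refine Or.inr (Or.inl ?_); omega
      · by_cases hvx : v = x
        · subst hvx
          simp at hc
          refine Or.inr (Or.inl ?_); omega
        · have hlt : x < v := lt_of_le_of_ne (hpw.1 v hv') (Ne.symm hvx)
          refine Or.inr (Or.inr ⟨v, hv', hlt, ?_⟩)
          rw [if_neg (fun h => hvx (beq_iff_eq.mp h).symm)] at hc
          omega

-- the two per-hand updates agree
lemma step_eq (pares : Int) (mano : List (Int × Int)) :
    pares_step_a pares mano = if hand_has_pair mano then pares + 1 else pares := by
  unfold pares_step_a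
  rw [PySem.List.foldl_append_singleton_eq_map]
  have hb : ((PySem.Dict.counter (mano.map (fun carta => carta.2))).values.any
      (fun cantidad => cantidad == 2)) = hand_has_pair mano := by
    rw [Bool.eq_iff_iff, counter_any_two, hand_has_pair_iff]
  simp only [List.nil_append, hb]

-- ===== VERDICT (by name: the statement is the Claim_ definition above) =====
theorem obtener_pares_spec : Claim_equal_obtener_pares := by
  intro manos _
  unfold Spec_obtener_pares obtener_pares obtener_pares_alt
  exact PySem.List.foldl_congr_mem manos pares_step_a _ 0 (fun pares mano _ => step_eq pares mano)
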